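-- pv_equiv track=rewrite | github.com/storm20/QAP | src/numerical/GHZ_d_error.py | convert_int_m_ary
-- ===== SOURCE A (Python) =====
-- def convert_int_m_ary(n,m,d):
--     m_ary = []
--     a,b = divmod(n,m)
--     m_ary.append(b)
--     while a != 0:
--         n = a
--         a,b = divmod(n,m)
--         m_ary.append(b)
--     if len(m_ary) < d:
--         range_ = d - len(m_ary)
--         for i in range(range_):
--             m_ary.append(0)
--     m_ary.reverse()
--     return m_ary
-- ===== SOURCE B (Python) =====
-- def convert_int_m_ary(n, m, d):
--     # number of significant base-m digits of n (1 when n // m == 0)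
--     c, q = 1, n // m
--     while q != 0:
--         c += 1
--         q //= m
--     L = max(c, d)
--     # zero prefix up to length L, then the significant digits MSB-first by
--     # positional extraction
--     return [0] * (L - c) + [(n // m ** (c - 1 - i)) % m for i in range(c)]
-- ===== Notes on version B (the rewrite author's own statement) =====
-- stated objective: alternative
-- what changed: A divmod-carries a running quotient, accumulating remainders LSB-first, then pads with a per-element append loop and reverses; B fixes the output length L = max(significant-digit count, d) up front, emits the zero prefix as [0]*(L-c), and extracts the significant digits MSB-first positionally as (n // m**(c-1-i)) % m, with no reverse and no append-loop padding.
-- outside the precondition, e.g. on convert_int_m_ary(3, -2, 1): A returns [-1, -1, 0, -1], B returns [-1, 0, 0, -1]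
import Mathlib
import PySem

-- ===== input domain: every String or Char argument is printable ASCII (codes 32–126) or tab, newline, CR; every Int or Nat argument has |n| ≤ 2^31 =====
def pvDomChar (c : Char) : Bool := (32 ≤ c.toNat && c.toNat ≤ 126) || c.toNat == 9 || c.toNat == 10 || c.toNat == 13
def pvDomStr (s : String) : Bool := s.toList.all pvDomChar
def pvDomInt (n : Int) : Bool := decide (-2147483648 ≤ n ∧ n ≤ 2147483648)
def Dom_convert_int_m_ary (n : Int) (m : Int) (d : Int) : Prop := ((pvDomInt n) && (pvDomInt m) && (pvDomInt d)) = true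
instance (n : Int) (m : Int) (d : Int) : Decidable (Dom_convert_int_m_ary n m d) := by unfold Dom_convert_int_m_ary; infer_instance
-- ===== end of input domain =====

-- B replaces A's carry-the-quotient divmod accumulation + pad + reverse by a length-first
-- construction: it counts the significant digits c, fixes the output length L = max(c, d)
-- up front, emits the zero prefix directly, and extracts the c significant digits
-- most-significant-first positionally as (n // m**(c-1-i)) % m, with no reverse
-- (objective: alternative).

-- ===== PORT A =====
-- the 'while a != 0' loop; fuel only makes the recursion total in Lean (on Pre_ the
-- loop runs at most n.natAbs+1 times — the quotient strictly decreases)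
def cimLoopA (fuel : Nat) (m : Int) (a : Int) (acc : List Int) : List Int :=
  match fuel with
  | 0 => acc
  | Nat.succ fuel =>
    if a = 0 then acc
    else cimLoopA fuel m (PySem.Int.floordiv a m) (acc ++ [PySem.Int.mod a m])

def convert_int_m_ary (n : Int) (m : Int) (d : Int) : List Int :=
  let a := PySem.Int.floordiv n m
  let b := PySem.Int.mod n m
  let m_ary : List Int := [b]
  let m_ary := cimLoopA (n.natAbs + 1) m a m_ary
  let m_ary :=
    if (m_ary.length : Int) < d then
      (PySem.List.pyRange 0 (d - (m_ary.length : Int)) 1).foldl (fun acc _ => acc ++ [0]) m_ary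
    else m_ary
  m_ary.reverse

-- ===== PORT B =====
-- the 'while q != 0' digit-count loop of Source B; fuel only makes it total in Lean
def cimCountB (fuel : Nat) (m : Int) (q : Int) (c : Int) : Int :=
  match fuel with
  | 0 => c
  | Nat.succ fuel =>
    if q = 0 then c
    else cimCountB fuel m (PySem.Int.floordiv q m) (c + 1)

def convert_int_m_ary_alt (n : Int) (m : Int) (d : Int) : List Int :=
  let c := cimCountB (n.natAbs + 1) m (PySem.Int.floordiv n m) 1
  let L := max c d
  PySem.List.pyRepeat [0] (L - c)
    ++ (PySem.List.pyRange 0 c 1).map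
        (fun i => PySem.Int.mod (PySem.Int.floordiv n (m ^ (c - 1 - i).toNat)) m)

-- ===== PRECONDITION & SPEC =====
-- Pre_ restricts to the natural domain of base conversion (base m ≥ 2, n ≥ 0, plus the
-- n = 0 corner for any nonzero m, where both sides agree): m = 0 makes A raise
-- ZeroDivisionError; m = 1 or n < 0 (with n ≠ 0) make A's while-loop diverge; and
-- negative bases m ≤ -2 with n ≠ 0, where A returns negative-base digits, are outside
-- what the function is for and are excluded.
def Pre_convert_int_m_ary (n : Int) (m : Int) (_d : Int) : Prop :=
  (0 ≤ n ∧ 2 ≤ m) ∨ (n = 0 ∧ m ≠ 0)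
instance (n : Int) (m : Int) (d : Int) : Decidable (Pre_convert_int_m_ary n m d) := by
  unfold Pre_convert_int_m_ary; infer_instance

def pvWitness_convert_int_m_ary : Int × Int × Int := (5, 3, 4)

def Spec_convert_int_m_ary (n : Int) (m : Int) (d : Int) (out : List Int) : Prop :=
  out = convert_int_m_ary_alt n m d
instance (n : Int) (m : Int) (d : Int) (out : List Int) : Decidable (Spec_convert_int_m_ary n m d out) := by
  unfold Spec_convert_int_m_ary; infer_instance

-- ===== CLAIM (what is proved, stated in full; the proofs are below) =====
def Claim_equal_convert_int_m_ary : Prop :=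
  ∀ (n : Int) (m : Int) (d : Int), Dom_convert_int_m_ary n m d →
    Pre_convert_int_m_ary n m d →
    Spec_convert_int_m_ary n m d (convert_int_m_ary n m d)

-- ===== LEMMAS AND PROOFS =====

-- strict decrease of the running quotient (fuel sufficiency on the main branch of Pre_)
theorem pv_ediv_lt_self {a m : Int} (ha : 0 < a) (hm : 2 ≤ m) : a / m < a := by
  rw [Int.ediv_lt_iff_lt_mul (by omega)]
  nlinarith

-- the reference list of base-m digits, least significant first, of a positive number
def lsbs (m : Int) (a : Int) : List Int :=
  if h : 0 < a ∧ 2 ≤ m then a % m :: lsbs m (a / m) else []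
termination_by a.toNat
decreasing_by
  have h1 : a / m < a := pv_ediv_lt_self h.1 h.2
  have h2 : 0 ≤ a / m := Int.ediv_nonneg (by omega) (by omega)
  omega

-- the digit list A accumulates before padding: n % m followed by the loop's digits
def dlist (m : Int) (n : Int) : List Int := n % m :: lsbs m (n / m)

theorem lsbs_eq_dlist {m a : Int} (ha : 0 < a) (hm : 2 ≤ m) :
    lsbs m a = dlist m a := by
  rw [lsbs, dif_pos ⟨ha, hm⟩]; rfl

theorem lsbs_zero (m : Int) : lsbs m 0 = [] := by
  rw [lsbs]; simp

-- PySem floor division/modulo facts for exact and zero dividends (any nonzero divisor)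
theorem pv_mod_zero_of_dvd {a m : Int} (hd : m ∣ a) : PySem.Int.mod a m = 0 :=
  (PySem.Int.mod_eq_zero_iff_dvd a m).mpr hd

theorem pv_floordiv_zero {m : Int} (hm : m ≠ 0) : PySem.Int.floordiv 0 m = 0 := by
  have h1 := PySem.Int.floordiv_mul_add_mod 0 m
  rw [pv_mod_zero_of_dvd (dvd_zero m)] at h1
  have h2 : PySem.Int.floordiv 0 m * m = 0 := by omega
  rcases mul_eq_zero.mp h2 with h | h
  · exact h
  · exact absurd h hm

theorem pv_mod_zero (m : Int) : PySem.Int.mod 0 m = 0 :=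
  pv_mod_zero_of_dvd (dvd_zero m)

-- A's while-loop computes acc ++ lsbs whenever the fuel covers the quotient
theorem cimLoopA_eq (fuel : Nat) (m a : Int) (acc : List Int)
    (ha : 0 ≤ a) (hm : 2 ≤ m) (hf : a.toNat ≤ fuel) :
    cimLoopA fuel m a acc = acc ++ lsbs m a := by
  induction fuel generalizing a acc with
  | zero =>
    have : a = 0 := by omega
    subst this
    simp [cimLoopA, lsbs_zero]
  | succ fuel ih =>
    by_cases h0 : a = 0
    · subst h0; simp [cimLoopA, lsbs_zero]
    · have hapos : 0 < a := by omega
      rw [cimLoopA]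
      rw [if_neg h0]
      rw [PySem.Int.floordiv_eq_ediv_of_pos (by omega), PySem.Int.mod_eq_emod_of_pos (by omega)]
      rw [ih (a / m) _ (Int.ediv_nonneg ha (by omega))
            (by have := pv_ediv_lt_self hapos hm
                have := Int.ediv_nonneg ha (show (0:Int) ≤ m by omega)
                omega)]
      conv_rhs => rw [lsbs, dif_pos ⟨hapos, hm⟩]
      simp

-- B's count loop computes c + (number of digits of the running quotient)
theorem cimCountB_eq (fuel : Nat) (m a c : Int)
    (ha : 0 ≤ a) (hm : 2 ≤ m) (hf : a.toNat ≤ fuel) :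
    cimCountB fuel m a c = c + (lsbs m a).length := by
  induction fuel generalizing a c with
  | zero =>
    have : a = 0 := by omega
    subst this
    simp [cimCountB, lsbs_zero]
  | succ fuel ih =>
    by_cases h0 : a = 0
    · subst h0; simp [cimCountB, lsbs_zero]
    · have hapos : 0 < a := by omega
      rw [cimCountB, if_neg h0]
      rw [PySem.Int.floordiv_eq_ediv_of_pos (by omega)]
      rw [ih (a / m) _ (Int.ediv_nonneg ha (by omega))
            (by have := pv_ediv_lt_self hapos hm
                have := Int.ediv_nonneg ha (show (0:Int) ≤ m by omega)
                omega)]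
      conv_rhs => rw [lsbs, dif_pos ⟨hapos, hm⟩]
      push_cast [List.length_cons]
      ring

-- the j-th entry of the digit list is the positionally extracted digit (a / m^j) % m
theorem dlist_getElem?_aux (m : Int) (hm : 2 ≤ m) :
    ∀ (N : Nat) (a : Int), a.toNat ≤ N → 0 ≤ a → ∀ (j : Nat), j < (dlist m a).length →
      (dlist m a)[j]? = some (a / m ^ j % m) := by
  intro N
  induction N with
  | zero =>
    intro a hN ha j hj
    have : a = 0 := by omega
    subst this
    match j with
    | 0 => simp [dlist]
    | Nat.succ j => simp [dlist, lsbs_zero] at hj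
  | succ N ih =>
    intro a hN ha j hj
    match j with
    | 0 => simp [dlist]
    | Nat.succ j =>
      have hq0 : 0 < a / m := by
        by_contra _h
        have hq : a / m = 0 := le_antisymm (by omega) (Int.ediv_nonneg ha (by omega))
        simp [dlist, hq, lsbs_zero] at hj
      have hapos : 0 < a := by
        by_contra _h
        have : a = 0 := by omega
        subst this
        simp at hq0
      have hlt : a / m < a := pv_ediv_lt_self hapos hm
      have htail : (dlist m a)[j+1]? = (lsbs m (a / m))[j]? := by
        simp [dlist]
      rw [htail, lsbs_eq_dlist hq0 hm]
      rw [ih (a / m) (by omega) (Int.ediv_nonneg ha (by omega)) j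
            (by simpa [dlist, lsbs_eq_dlist hq0 hm] using Nat.lt_of_succ_lt_succ hj)]
      rw [Int.ediv_ediv_of_nonneg (by omega)]
      rw [pow_succ, mul_comm (m ^ j) m]

theorem dlist_getElem? (m : Int) (hm : 2 ≤ m) (a : Int) (ha : 0 ≤ a) (j : Nat)
    (hj : j < (dlist m a).length) : (dlist m a)[j]? = some (a / m ^ j % m) :=
  dlist_getElem?_aux m hm a.toNat a le_rfl ha j hj

-- A's padding loop appends zeros
theorem pad_foldl (k : Int) (xs : List Int) :
    (PySem.List.pyRange 0 k 1).foldl (fun acc _ => acc ++ [0]) xs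
      = xs ++ List.replicate k.toNat (0 : Int) := by
  rw [PySem.List.pyRange_one]
  simp only [Int.sub_zero]
  induction k.toNat generalizing xs with
  | zero => simp
  | succ j ih =>
    rw [List.range_succ]
    simp only [List.map_append, List.foldl_append]
    rw [ih]
    simp [List.replicate_succ']

-- A as one padded-and-reversed expression
theorem convA_closed (n m d : Int) (hm : 2 ≤ m) (hn : 0 ≤ n) :
    convert_int_m_ary n m d
      = List.replicate (max ((dlist m n).length : Int) d - (dlist m n).length).toNat (0:Int)
          ++ (dlist m n).reverse := by
  unfold convert_int_m_ary
  have hmpos : (0:Int) < m := by omega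
  have hq_nonneg : 0 ≤ n / m := Int.ediv_nonneg hn (by omega)
  have hq_le : n / m ≤ n := Int.ediv_le_self m hn
  have hA : cimLoopA (n.natAbs + 1) m (PySem.Int.floordiv n m) [PySem.Int.mod n m]
      = dlist m n := by
    rw [PySem.Int.floordiv_eq_ediv_of_pos hmpos, PySem.Int.mod_eq_emod_of_pos hmpos,
        cimLoopA_eq _ _ _ _ hq_nonneg hm (by omega)]
    rfl
  simp only []
  rw [hA]
  set c : Int := ((dlist m n).length : Int) with hc
  by_cases h : c < d
  · rw [if_pos h, pad_foldl]
    rw [List.reverse_append, List.reverse_replicate]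
    have : max c d - c = d - c := by omega
    rw [this]
  · rw [if_neg h]
    have : (max c d - c).toNat = 0 := by omega
    rw [this]
    simp

-- ===== VERDICT (by name: the statement is the Claim_ definition above) =====
theorem convert_int_m_ary_spec : Claim_equal_convert_int_m_ary := by
  intro n m d _ hpre
  unfold Spec_convert_int_m_ary
  by_cases hmain : 0 ≤ n ∧ 2 ≤ m
  · -- main branch: n ≥ 0, m ≥ 2
    obtain ⟨hn, hm⟩ := hmain
    have hmpos : (0:Int) < m := by omega
    have hm0 : m ≠ 0 := by omega
    rw [convA_closed n m d hm hn]
    unfold convert_int_m_ary_alt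
    simp only []
    set D : List Int := dlist m n with hD
    have hq_nonneg : 0 ≤ n / m := Int.ediv_nonneg hn (by omega)
    have hq_le : n / m ≤ n := Int.ediv_le_self m hn
    have hB : cimCountB (n.natAbs + 1) m (PySem.Int.floordiv n m) 1 = (D.length : Int) := by
      rw [PySem.Int.floordiv_eq_ediv_of_pos hmpos,
          cimCountB_eq _ _ _ _ hq_nonneg hm (by omega)]
      simp [hD, dlist]
      omega
    rw [hB]
    set c : Int := (D.length : Int) with hc
    have hc1 : 1 ≤ c := by simp [hc, hD, dlist]
    set L : Int := max c d with hL
    rw [PySem.List.pyRepeat_singleton]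
    -- the zero prefixes agree syntactically; the significant digits are D reversed
    congr 1
    apply List.ext_getElem?
    intro k
    by_cases hk : k < D.length
    · rw [List.getElem?_map]
      rw [List.getElem?_reverse hk]
      have hDij : D[D.length - 1 - k]? = some (n / m ^ (D.length - 1 - k) % m) := by
        rw [hD]
        exact dlist_getElem? m hm n hn _ (by rw [← hD]; omega)
      rw [hDij]
      rw [List.getElem?_eq_getElem (by rw [PySem.List.length_pyRange_one]; omega)]
      rw [PySem.List.getElem_pyRange_one]
      simp only [Option.map_some, Int.zero_add]
      have hexp : (c - 1 - (k : Int)).toNat = D.length - 1 - k := by omega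
      rw [hexp]
      rw [PySem.Int.floordiv_eq_ediv_of_pos (pow_pos hmpos _),
          PySem.Int.mod_eq_emod_of_pos hmpos]
    · rw [List.getElem?_eq_none (by simp only [List.length_reverse]; omega),
          List.getElem?_eq_none
            (by simp only [List.length_map, PySem.List.length_pyRange_one]; omega)]
  · -- corner branch of Pre_: n = 0, m ≠ 0 (both sides are all zeros of length max(1,d))
    have hn0 : n = 0 ∧ m ≠ 0 := by
      rcases hpre with h | h
      · exact absurd h hmain
      · exact h
    obtain ⟨hn, hm0⟩ := hn0
    subst hn
    unfold convert_int_m_ary convert_int_m_ary_alt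
    simp only [Int.natAbs_zero, Nat.zero_add]
    rw [pv_floordiv_zero hm0, pv_mod_zero]
    have hloop : cimLoopA 1 m 0 [0] = [0] := by simp [cimLoopA]
    have hcount : cimCountB 1 m 0 1 = 1 := by simp [cimCountB]
    rw [hloop, hcount]
    set L : Int := max 1 d with hL
    have hL1 : 1 ≤ L := le_max_left _ _
    have hone : PySem.List.pyRange 0 1 1 = [0] := by decide
    have hdig : PySem.Int.mod (PySem.Int.floordiv 0 (m ^ ((1:Int) - 1 - 0).toNat)) m = 0 := by
      rw [pv_floordiv_zero (pow_ne_zero _ hm0), pv_mod_zero]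
    rw [PySem.List.pyRepeat_singleton, hone]
    simp only [List.map_cons, List.map_nil, hdig]
    by_cases h : (1:Int) < d
    · rw [if_pos (by simpa using h), pad_foldl]
      rw [List.reverse_append, List.reverse_replicate, List.reverse_singleton]
      have h1 : (d - (([0]:List Int).length : Int)).toNat = (L - 1).toNat := by
        simp only [List.length_singleton]
        omega
      rw [h1]
    · rw [if_neg (by simpa using h)]
      have : (L - 1).toNat = 0 := by omega
      rw [this]
      simp
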